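-- pv_equiv track=rewrite | github.com/miliar/Code_Jam_Webscraper | solutions_python/solutions_year14_round0_nr4/1498.py | solve_war
-- ===== SOURCE A (Python) =====
-- def ken_choose(B_ken, chosen_naomi):
-- 	try:
-- 		chosen_ken = min(filter(lambda x: x > chosen_naomi, B_ken))
-- 	except ValueError:
-- 		chosen_ken = min(B_ken)
-- 	B_ken.remove(chosen_ken)
-- 	return chosen_ken
--
-- def solve_war(B_naomi, B_ken):
-- 	B_naomi = set(B_naomi)
-- 	B_ken = set(B_ken)
-- 	score_naomi = 0
--
-- 	while len(B_naomi) > 0: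
-- 		chosen_naomi = B_naomi.pop()
-- 		chosen_ken = ken_choose(B_ken, chosen_naomi)
-- 		if chosen_naomi > chosen_ken:
-- 			score_naomi += 1
--
-- 	return score_naomi
-- ===== SOURCE B (Python) =====
-- def solve_war(B_naomi, B_ken):
--     ns = sorted(set(B_naomi))
--     ks = sorted(set(B_ken))
--     j = 0
--     for k in ks:
--         if j < len(ns) and k > ns[j]:
--             j += 1
--     return len(ns) - j
-- ===== Notes on version B (the rewrite author's own statement) =====
-- stated objective: faster
-- what changed: Replaces the per-round linear scans (filter+min+remove over Ken's remaining set) by sorting both distinct-value lists once and counting Naomi's unbeatable cards with a single two-pointer sweep.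
-- outside the precondition, e.g. on solve_war([6], [6]): A returns 0, B returns 1; on solve_war([8, 4, 0, 17, 28], [18, 26, 6, 28, 14]): A returns 0, B returns 1
import Mathlib
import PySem

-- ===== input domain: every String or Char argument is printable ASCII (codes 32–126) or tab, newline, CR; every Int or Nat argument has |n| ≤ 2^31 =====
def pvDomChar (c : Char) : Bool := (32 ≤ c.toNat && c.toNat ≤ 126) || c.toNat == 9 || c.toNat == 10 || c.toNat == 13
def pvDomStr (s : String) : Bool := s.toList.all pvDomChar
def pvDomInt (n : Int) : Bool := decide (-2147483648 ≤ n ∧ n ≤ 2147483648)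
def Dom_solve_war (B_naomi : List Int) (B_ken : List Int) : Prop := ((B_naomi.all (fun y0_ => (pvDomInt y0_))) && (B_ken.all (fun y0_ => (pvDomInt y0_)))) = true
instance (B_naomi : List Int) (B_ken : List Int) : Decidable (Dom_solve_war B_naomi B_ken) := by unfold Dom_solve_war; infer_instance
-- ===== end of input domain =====

-- B replaces A's per-round scans of Ken's remaining set by one sort of each distinct-value
-- list and a single two-pointer sweep (objective: faster; measured).
-- CPython's set.pop order is unspecified/not modelled; A's port pops in insertion order —
-- on Pre_ (disjoint value sets) the result is independent of that order, which the proof shows.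


-- ===== PORT A =====
-- try: chosen_ken = min(filter(lambda x: x > chosen_naomi, B_ken))
-- except ValueError: chosen_ken = min(B_ken)      (min of empty B_ken: ValueError escapes = none)
-- B_ken.remove(chosen_ken); return chosen_ken
def ken_choose (B_ken : List Int) (chosen_naomi : Int) : Option (Int × List Int) :=
  match (match PySem.List.min? (B_ken.filter (fun x => decide (x > chosen_naomi))) (fun v => v) with
         | some c => some c
         | none => PySem.List.min? B_ken (fun v => v)) with
  | none => none
  | some c => (PySem.List.remove? B_ken c).map (fun rest => (c, rest))

-- while len(B_naomi) > 0: pop, play ken_choose, count Naomi's wins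
def warLoop : List Int → List Int → Int → Int
  | [], _, score => score
  | x :: ns, bKen, score =>
    match ken_choose bKen x with
    | none => score          -- Python raises ValueError here; excluded by Pre_
    | some (c, bKen') => warLoop ns bKen' (if x > c then score + 1 else score)

def solve_war (B_naomi : List Int) (B_ken : List Int) : Int :=
  warLoop (PySem.Set.ofList B_naomi) (PySem.Set.ofList B_ken) 0

-- ===== PORT B =====
def solve_war_alt (B_naomi : List Int) (B_ken : List Int) : Int :=
  let ns := PySem.List.sorted (PySem.Set.ofList B_naomi) (fun v => v)
  let ks := PySem.List.sorted (PySem.Set.ofList B_ken) (fun v => v)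
  let j := ks.foldl
    (fun j k => if j < (ns.length : Int) ∧ PySem.List.pyGetD ns j 0 < k then j + 1 else j) 0
  (ns.length : Int) - j

-- ===== PRECONDITION & SPEC =====
-- Pre_ excludes (i) inputs whose two lists share a value — there ties occur and A's result
-- depends on CPython's unspecified set-pop order, so A's and B's values are both defensible
-- accidents — and (ii) inputs with fewer distinct Ken than Naomi values, where A raises
-- ValueError.
def Pre_solve_war (B_naomi : List Int) (B_ken : List Int) : Prop :=
  (∀ a ∈ B_naomi, a ∉ B_ken) ∧
  (PySem.Set.ofList B_naomi).length ≤ (PySem.Set.ofList B_ken).length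

instance (B_naomi : List Int) (B_ken : List Int) : Decidable (Pre_solve_war B_naomi B_ken) := by
  unfold Pre_solve_war; infer_instance

def pvWitness_solve_war : List Int × List Int := ([2, 7, 2], [5, 1, 9])

def Spec_solve_war (B_naomi : List Int) (B_ken : List Int) (out : Int) : Prop :=
  out = solve_war_alt B_naomi B_ken
instance (B_naomi : List Int) (B_ken : List Int) (out : Int) : Decidable (Spec_solve_war B_naomi B_ken out) := by
  unfold Spec_solve_war; infer_instance

-- ===== CLAIM (what is proved, stated in full; the proofs are below) =====
def Claim_equal_solve_war : Prop := ∀ (B_naomi : List Int) (B_ken : List Int), Dom_solve_war B_naomi B_ken → Pre_solve_war B_naomi B_ken → Spec_solve_war B_naomi B_ken (solve_war B_naomi B_ken)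

-- ===== LEMMAS AND PROOFS =====

-- Ken's reply to x from hand K: the minimal card beating x, else the minimal card.
def IsRep (K : List Int) (x c : Int) : Prop :=
  c ∈ K ∧ ((x < c ∧ ∀ y ∈ K, x < y → c ≤ y) ∨ ((∀ y ∈ K, ¬ x < y) ∧ ∀ y ∈ K, c ≤ y))

lemma ken_choose_spec (K : List Int) (x : Int) (hne : K ≠ []) :
    ∃ c, IsRep K x c ∧ ken_choose K x = some (c, K.erase c) := by
  rcases hb : PySem.List.min? (K.filter (fun v => decide (v > x))) (fun v => v) with _ | c
  · -- no beater: reply is min K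
    rw [PySem.List.min?_eq_none_iff] at hb
    have hnob : ∀ y ∈ K, ¬ x < y := by
      intro y hy hxy
      have : y ∈ K.filter (fun v => decide (v > x)) := by
        simp [List.mem_filter, hy, hxy]
      rw [hb] at this; cases this
    rcases hm : PySem.List.min? K (fun v => v) with _ | m
    · rw [PySem.List.min?_eq_none_iff] at hm; exact absurd hm hne
    · refine ⟨m, ⟨PySem.List.min?_mem hm, Or.inr ⟨hnob, fun y hy => PySem.List.min?_isMin hm y hy⟩⟩, ?_⟩
      have hnil : PySem.List.min? ([] : List Int) (fun v => v) = none :=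
        (PySem.List.min?_eq_none_iff _ _).mpr rfl
      simp only [ken_choose, hb, hnil, hm,
        PySem.List.remove?_eq_some_erase K m (PySem.List.min?_mem hm), Option.map]
  · -- minimal beater
    have hcK : c ∈ K := (List.mem_filter.mp (PySem.List.min?_mem hb)).1
    have hxc : x < c := by
      have := (List.mem_filter.mp (PySem.List.min?_mem hb)).2; simpa using this
    refine ⟨c, ⟨hcK, Or.inl ⟨hxc, ?_⟩⟩, ?_⟩
    · intro y hy hxy
      exact PySem.List.min?_isMin hb y (by simp [List.mem_filter, hy, hxy])
    · simp only [ken_choose, hb, PySem.List.remove?_eq_some_erase K c hcK, Option.map]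

lemma IsRep_unique {K : List Int} {x c c' : Int} (h : IsRep K x c) (h' : IsRep K x c') : c = c' := by
  obtain ⟨hc, h⟩ := h; obtain ⟨hc', h'⟩ := h'
  rcases h with ⟨hxc, hmin⟩ | ⟨hnob, hmin⟩ <;> rcases h' with ⟨hxc', hmin'⟩ | ⟨hnob', hmin'⟩
  · have := hmin c' hc' hxc'; have := hmin' c hc hxc; omega
  · exact absurd hxc (hnob' c hc)
  · exact absurd hxc' (hnob c' hc')
  · have := hmin c' hc'; have := hmin' c hc; omega

lemma warLoop_cons {K K' : List Int} {x c : Int} (ns : List Int) (s : Int)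
    (h : ken_choose K x = some (c, K')) :
    warLoop (x :: ns) K s = warLoop ns K' (if x > c then s + 1 else s) := by
  simp [warLoop, h]

-- the reply to x is below x exactly when Ken has no beater (on disjoint hands)
lemma IsRep_lt_iff {K : List Int} {x c : Int} (h : IsRep K x c) (hx : x ∉ K) :
    (x > c) ↔ ∀ y ∈ K, ¬ x < y := by
  obtain ⟨hc, h⟩ := h
  constructor
  · intro hcx y hy hxy
    rcases h with ⟨hxc, _⟩ | ⟨hnob, _⟩
    · omega
    · exact hnob y hy hxy
  · intro hnob
    have := hnob c hc
    have : c ≠ x := fun he => hx (he ▸ hc)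
    omega

-- ===== the swap lemma: the first two Naomi cards may be exchanged =====
lemma warLoop_swap_lt (x y : Int) (N K : List Int) (s : Int) (hxy : x < y)
    (hx : x ∉ K) (hy : y ∉ K) (hlen : 2 ≤ K.length) :
    warLoop (x :: y :: N) K s = warLoop (y :: x :: N) K s := by
  have hne : K ≠ [] := by intro h; subst h; simp at hlen
  obtain ⟨cx, hcx, hkx⟩ := ken_choose_spec K x hne
  obtain ⟨cy, hcy, hky⟩ := ken_choose_spec K y hne
  have hlex : (K.erase cx).length = K.length - 1 := List.length_erase_of_mem hcx.1
  have hley : (K.erase cy).length = K.length - 1 := List.length_erase_of_mem hcy.1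
  have hnex : K.erase cx ≠ [] := by
    intro h; rw [← List.length_eq_zero_iff] at h; omega
  have hney : K.erase cy ≠ [] := by
    intro h; rw [← List.length_eq_zero_iff] at h; omega
  obtain ⟨c2, hc2, hk2⟩ := ken_choose_spec (K.erase cx) y hnex
  obtain ⟨d2, hd2, hk2'⟩ := ken_choose_spec (K.erase cy) x hney
  rw [warLoop_cons _ _ hkx, warLoop_cons _ _ hk2,
      warLoop_cons _ _ hky, warLoop_cons _ _ hk2']
  have hxK : x ∉ K.erase cy := fun h => hx (List.mem_of_mem_erase h)
  have hyK : y ∉ K.erase cx := fun h => hy (List.mem_of_mem_erase h)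
  -- score indicators
  rw [if_congr (IsRep_lt_iff hcx hx) rfl rfl, if_congr (IsRep_lt_iff hc2 hyK) rfl rfl,
      if_congr (IsRep_lt_iff hcy hy) rfl rfl, if_congr (IsRep_lt_iff hd2 hxK) rfl rfl]
  by_cases hBy : ∃ k ∈ K, y < k
  · -- Case 1: Ken can beat y (hence x); nobody scores in these two rounds
    obtain ⟨k0, hk0, hyk0⟩ := hBy
    have hcyL : y < cy ∧ ∀ t ∈ K, y < t → cy ≤ t := by
      rcases hcy.2 with h | h
      · exact h
      · exact absurd hyk0 (h.1 k0 hk0)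
    have hcxL : x < cx ∧ ∀ t ∈ K, x < t → cx ≤ t := by
      rcases hcx.2 with h | h
      · exact h
      · exact absurd (lt_trans hxy hyk0) (h.1 k0 hk0)
    have hnsx : ¬ ∀ t ∈ K, ¬ x < t := fun h => h k0 hk0 (lt_trans hxy hyk0)
    have hnsy : ¬ ∀ t ∈ K, ¬ y < t := fun h => h k0 hk0 hyk0
    rw [if_neg hnsx, if_neg hnsy]
    by_cases hcc : cx = cy
    · -- 1b: the same card answers both; afterwards both hands are K.erase cx
      subst hcc
      -- every beater of x beats y too
      have hBB : ∀ t ∈ K, x < t → y < t := by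
        intro t ht hxt
        by_contra hyt
        have h1 := hcxL.2 t ht hxt
        have h2 : t < cx := lt_of_le_of_lt (not_lt.mp hyt) hcyL.1
        omega
      have hd2c2 : d2 = c2 := by
        refine IsRep_unique hd2 ⟨hc2.1, ?_⟩
        rcases hc2.2 with ⟨hyc2, hmin⟩ | ⟨hnob, hmin⟩
        · exact Or.inl ⟨lt_trans hxy hyc2, fun t ht hxt =>
            hmin t ht (hBB t (List.mem_of_mem_erase ht) hxt)⟩
        · exact Or.inr ⟨fun t ht hxt => hnob t ht (hBB t (List.mem_of_mem_erase ht) hxt), hmin⟩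
      rw [hd2c2]
      by_cases hB2 : ∀ t ∈ K.erase cx, ¬ y < t
      · have hB2' : ∀ t ∈ K.erase cx, ¬ x < t :=
          fun t ht hxt => hB2 t ht (hBB t (List.mem_of_mem_erase ht) hxt)
        rw [if_pos hB2, if_pos hB2']
      · have hB2' : ¬ ∀ t ∈ K.erase cx, ¬ x < t := by
          intro h; exact hB2 (fun t ht hyt => h t ht (lt_trans hxy hyt))
        rw [if_neg hB2, if_neg hB2']
    · -- 1a: distinct minimal beaters; each is still available in the other order
      have hcxy : cx < cy := by
        have h1 := hcxL.2 cy hcy.1 (lt_trans hxy hcyL.1)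
        omega
      have hc2cy : c2 = cy := by
        refine IsRep_unique hc2 ⟨(List.mem_erase_of_ne (Ne.symm hcc)).mpr hcy.1, Or.inl
          ⟨hcyL.1, fun t ht hyt => hcyL.2 t (List.mem_of_mem_erase ht) hyt⟩⟩
      have hd2cx : d2 = cx := by
        refine IsRep_unique hd2 ⟨(List.mem_erase_of_ne hcc).mpr hcx.1, Or.inl
          ⟨hcxL.1, fun t ht hxt => hcxL.2 t (List.mem_of_mem_erase ht) hxt⟩⟩
      rw [hc2cy, hd2cx]
      have hN1 : ¬ ∀ t ∈ K.erase cx, ¬ y < t := by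
        intro h
        exact h cy ((List.mem_erase_of_ne (Ne.symm hcc)).mpr hcy.1) hcyL.1
      have hN2 : ¬ ∀ t ∈ K.erase cy, ¬ x < t := by
        intro h
        exact h cx ((List.mem_erase_of_ne hcc).mpr hcx.1) hcxL.1
      rw [if_neg hN1, if_neg hN2, List.erase_comm]
  · -- Ken cannot beat y: y always scores
    push_neg at hBy
    have hcyR : (∀ t ∈ K, ¬ y < t) ∧ ∀ t ∈ K, cy ≤ t := by
      rcases hcy.2 with h | h
      · exact absurd h.1 (by simpa using hBy cy hcy.1)
      · exact ⟨fun t ht => by simpa using hBy t ht, h.2⟩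
    rw [if_pos hcyR.1]
    by_cases hBx : ∃ k ∈ K, x < k
    · -- Case 2: x can be beaten, y cannot
      obtain ⟨k0, hk0, hxk0⟩ := hBx
      have hcxL : x < cx ∧ ∀ t ∈ K, x < t → cx ≤ t := by
        rcases hcx.2 with h | h
        · exact h
        · exact absurd hxk0 (h.1 k0 hk0)
      have hnsx : ¬ ∀ t ∈ K, ¬ x < t := fun h => h k0 hk0 hxk0
      rw [if_neg hnsx]
      have hcyx : cy ≠ x := fun h => hx (h ▸ hcy.1)
      by_cases hm : cy < x
      · -- 2a: Ken's overall minimum is below x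
        have hcycx : cy ≠ cx := by omega
        have hc2cy : c2 = cy := by
          refine IsRep_unique hc2 ⟨(List.mem_erase_of_ne hcycx).mpr hcy.1, Or.inr
            ⟨fun t ht => hcyR.1 t (List.mem_of_mem_erase ht),
             fun t ht => hcyR.2 t (List.mem_of_mem_erase ht)⟩⟩
        have hd2cx : d2 = cx := by
          refine IsRep_unique hd2 ⟨(List.mem_erase_of_ne (Ne.symm hcycx)).mpr hcx.1, Or.inl
            ⟨hcxL.1, fun t ht hxt => hcxL.2 t (List.mem_of_mem_erase ht) hxt⟩⟩
        rw [hc2cy, hd2cx]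
        have hP1 : ∀ t ∈ K.erase cx, ¬ y < t := fun t ht => hcyR.1 t (List.mem_of_mem_erase ht)
        have hP2 : ¬ ∀ t ∈ K.erase cy, ¬ x < t := by
          intro h
          exact h cx ((List.mem_erase_of_ne (Ne.symm hcycx)).mpr hcx.1) hcxL.1
        rw [if_pos hP1, if_neg hP2, List.erase_comm]
      · -- 2b: every Ken card is above x, so the minimum beater IS the minimum card
        have hxcy : x < cy := by omega
        have hall : ∀ t ∈ K, x < t := fun t ht => lt_of_lt_of_le hxcy (hcyR.2 t ht)
        have hcxcy : cx = cy := by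
          have h1 := hcxL.2 cy hcy.1 hxcy
          have h2 := hcyR.2 cx hcx.1
          omega
        rw [← hcxcy] at hd2 ⊢
        have hd2c2 : d2 = c2 := by
          refine IsRep_unique hd2 ⟨hc2.1, ?_⟩
          rcases hc2.2 with ⟨hyc2, _⟩ | ⟨hnob, hmin⟩
          · exact absurd hyc2 (hcyR.1 c2 (List.mem_of_mem_erase hc2.1))
          · exact Or.inl ⟨hall c2 (List.mem_of_mem_erase hc2.1), fun t ht _ => hmin t ht⟩
        rw [hd2c2]
        have hP1 : ∀ t ∈ K.erase cx, ¬ y < t := fun t ht => hcyR.1 t (List.mem_of_mem_erase ht)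
        have hP2 : ¬ ∀ t ∈ K.erase cx, ¬ x < t := by
          intro h
          exact h c2 hc2.1 (hall c2 (List.mem_of_mem_erase hc2.1))
        rw [if_pos hP1, if_neg hP2]
    · -- Case 3: Ken can beat neither card; both rounds score in either order
      push_neg at hBx
      have hcxR : ∀ t ∈ K, cx ≤ t := by
        rcases hcx.2 with h | h
        · exact absurd h.1 (by simpa using hBx cx hcx.1)
        · exact h.2
      have hnsx : ∀ t ∈ K, ¬ x < t := fun t ht => by simpa using hBx t ht
      rw [if_pos hnsx]
      have hcxcy : cx = cy := by
        have h1 := hcxR cy hcy.1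
        have h2 := hcyR.2 cx hcx.1
        omega
      rw [← hcxcy] at hd2 ⊢
      have hd2c2 : d2 = c2 := by
        refine IsRep_unique hd2 ⟨hc2.1, Or.inr ⟨fun t ht => hnsx t (List.mem_of_mem_erase ht), ?_⟩⟩
        rcases hc2.2 with ⟨hyc2, _⟩ | ⟨_, hmin⟩
        · exact absurd hyc2 (hcyR.1 c2 (List.mem_of_mem_erase hc2.1))
        · exact hmin
      rw [hd2c2]
      have hP1 : ∀ t ∈ K.erase cx, ¬ y < t := fun t ht => hcyR.1 t (List.mem_of_mem_erase ht)
      have hP2 : ∀ t ∈ K.erase cx, ¬ x < t := fun t ht => hnsx t (List.mem_of_mem_erase ht)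
      rw [if_pos hP1, if_pos hP2]

lemma warLoop_swap (x y : Int) (N K : List Int) (s : Int)
    (hx : x ∉ K) (hy : y ∉ K) (hlen : 2 ≤ K.length) :
    warLoop (x :: y :: N) K s = warLoop (y :: x :: N) K s := by
  rcases lt_trichotomy x y with h | h | h
  · exact warLoop_swap_lt x y N K s h hx hy hlen
  · subst h; rfl
  · exact (warLoop_swap_lt y x N K s h hy hx hlen).symm

-- Naomi's score does not depend on the order her cards are played in
lemma warLoop_perm {N N' : List Int} (h : N.Perm N') :
    ∀ K s, (∀ a ∈ N, a ∉ K) → N.length ≤ K.length → warLoop N K s = warLoop N' K s := by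
  induction h with
  | nil => intro K s _ _; rfl
  | cons x h IH =>
    intro K s hdisj hlen
    rename_i l₁ l₂
    have hne : K ≠ [] := by
      intro he; subst he; simp at hlen
    obtain ⟨c, hc, hk⟩ := ken_choose_spec K x hne
    rw [warLoop_cons _ _ hk, warLoop_cons _ _ hk]
    refine IH (K.erase c) _ (fun a ha hak => hdisj a (List.mem_cons_of_mem x ha)
      (List.mem_of_mem_erase hak)) ?_
    have := List.length_erase_of_mem hc.1
    simp at hlen; omega
  | swap x y l =>
    intro K s hdisj hlen
    refine warLoop_swap y x l K s (hdisj y (by simp)) (hdisj x (by simp)) ?_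
    simp at hlen; omega
  | trans h1 h2 IH1 IH2 =>
    intro K s hdisj hlen
    rw [IH1 K s hdisj hlen]
    exact IH2 K s (fun a ha => hdisj a (h1.mem_iff.mpr ha)) (h1.length_eq ▸ hlen)

-- ===== the two-pointer count =====
def twoRec : List Int → List Int → Nat
  | _, [] => 0
  | [], _ :: _ => 0
  | n :: ns, k :: ks => if n < k then 1 + twoRec ns ks else twoRec (n :: ns) ks

lemma twoRec_nil : ∀ ks, twoRec [] ks = 0
  | [] => rfl
  | _ :: _ => rfl

lemma twoRec_zero (n : Int) (ns : List Int) :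
    ∀ ks, (∀ k ∈ ks, ¬ n < k) → twoRec (n :: ns) ks = 0 := by
  intro ks
  induction ks with
  | nil => intro _; rfl
  | cons k ks IH =>
    intro h
    rw [twoRec, if_neg (h k (by simp))]
    exact IH fun t ht => h t (by simp [ht])

lemma twoRec_append_skip (n : Int) (ns : List Int) :
    ∀ L ks, (∀ l ∈ L, ¬ n < l) → twoRec (n :: ns) (L ++ ks) = twoRec (n :: ns) ks := by
  intro L
  induction L with
  | nil => intro ks _; rfl
  | cons l L IH =>
    intro ks h
    rw [List.cons_append, twoRec, if_neg (h l (by simp))]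
    exact IH ks fun t ht => h t (by simp [ht])

-- matching the head x with its minimal beater c removes one winning block
lemma twoRec_step (x : Int) (rest sk : List Int) (c : Int) (hsk : sk.Pairwise (· < ·))
    (hc : c ∈ sk) (hxc : x < c) (hmin : ∀ y ∈ sk, x < y → c ≤ y)
    (hrest : ∀ n ∈ rest, x < n) :
    twoRec (x :: rest) sk = 1 + twoRec rest (sk.erase c) := by
  obtain ⟨L, R, rfl⟩ := List.append_of_mem hc
  have hL : ∀ l ∈ L, ¬ x < l := by
    intro l hl hxl
    have h1 := hmin l (by simp [hl]) hxl
    have h2 : l < c := by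
      have := List.pairwise_append.mp hsk
      exact this.2.2 l hl c (by simp)
    omega
  have hcL : c ∉ L := fun h => hL c h hxc
  rw [twoRec_append_skip x rest L (c :: R) hL, twoRec, if_pos hxc,
      List.erase_append_right _ hcL, List.erase_cons_head]
  congr 1
  cases rest with
  | nil => rw [twoRec_nil, twoRec_nil]
  | cons r rest' =>
    exact (twoRec_append_skip r rest' L R (fun l hl hrl =>
      hL l hl (lt_trans (hrest r (by simp)) hrl))).symm

-- when every Ken card is below every remaining Naomi card, Naomi wins every round
lemma warLoop_allsmall : ∀ (ns K : List Int) (s : Int),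
    (∀ n ∈ ns, ∀ k ∈ K, k < n) → ns.length ≤ K.length →
    warLoop ns K s = s + ns.length := by
  intro ns
  induction ns with
  | nil => intro K s _ _; simp [warLoop]
  | cons x rest IH =>
    intro K s hsmall hlen
    have hne : K ≠ [] := by intro he; subst he; simp at hlen
    obtain ⟨c, hc, hk⟩ := ken_choose_spec K x hne
    have hcx : c < x := hsmall x (by simp) c hc.1
    rw [warLoop_cons _ _ hk, if_pos hcx,
        IH (K.erase c) _ (fun n hn k hk' => hsmall n (by simp [hn]) k (List.mem_of_mem_erase hk'))
          (by have := List.length_erase_of_mem hc.1; simp at hlen; omega)]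
    simp only [List.length_cons]
    push_cast
    ring

-- the war played in ascending order computes |ns| minus the two-pointer count
lemma warLoop_sorted : ∀ (ns K sk : List Int) (s : Int),
    ns.Pairwise (· < ·) → (∀ a ∈ ns, a ∉ K) → ns.length ≤ K.length →
    sk.Perm K → sk.Pairwise (· < ·) →
    warLoop ns K s = s + (ns.length : Int) - (twoRec ns sk : Int) := by
  intro ns
  induction ns with
  | nil => intro K sk s _ _ _ _ _; simp [warLoop, twoRec_nil]
  | cons x rest IH =>
    intro K sk s hns hdisj hlen hperm hsk
    have hne : K ≠ [] := by intro he; subst he; simp at hlen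
    obtain ⟨c, hc, hk⟩ := ken_choose_spec K x hne
    have hxK : x ∉ K := hdisj x (by simp)
    by_cases hbeat : ∃ k ∈ K, x < k
    · obtain ⟨k0, hk0, hxk0⟩ := hbeat
      have hcL : x < c ∧ ∀ t ∈ K, x < t → c ≤ t := by
        rcases hc.2 with h | h
        · exact h
        · exact absurd hxk0 (h.1 k0 hk0)
      rw [warLoop_cons _ _ hk, if_neg (by omega : ¬ x > c)]
      have hstep := twoRec_step x rest sk c hsk (hperm.mem_iff.mpr hc.1) hcL.1
        (fun y hy hxy => hcL.2 y (hperm.mem_iff.mp hy) hxy)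
        (fun n hn => List.rel_of_pairwise_cons hns hn)
      rw [IH (K.erase c) (sk.erase c) _ (List.Pairwise.of_cons hns)
        (fun a ha hak => hdisj a (by simp [ha]) (List.mem_of_mem_erase hak))
        (by have := List.length_erase_of_mem hc.1; simp at hlen; omega)
        (hperm.erase c) (hsk.sublist List.erase_sublist), hstep]
      simp only [List.length_cons]
      push_cast
      ring
    · push_neg at hbeat
      have hall : ∀ n ∈ x :: rest, ∀ k ∈ K, k < n := by
        intro n hn k hkK
        have h1 : k ≤ x := not_lt.mp (by simpa using hbeat k hkK)
        have h2 : k ≠ x := fun he => hxK (he ▸ hkK)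
        rcases List.mem_cons.mp hn with rfl | hn
        · omega
        · have := List.rel_of_pairwise_cons hns hn; omega
      rw [warLoop_allsmall (x :: rest) K s hall hlen,
          twoRec_zero x rest sk (fun k hkk => by
            simpa using hbeat k (hperm.mem_iff.mp hkk))]
      simp only [List.length_cons]
      push_cast
      ring

-- ===== B's fold is the two-pointer count =====
lemma foldl_twoPtr (ns : List Int) :
    ∀ (ks : List Int) (j : Nat), j ≤ ns.length →
      ks.foldl (fun j k => if j < (ns.length : Int) ∧ PySem.List.pyGetD ns j 0 < k
                           then j + 1 else j) (j : Int)
        = (j : Int) + (twoRec (ns.drop j) ks : Int) := by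
  intro ks
  induction ks with
  | nil => intro j _; simp
  | cons k ks IH =>
    intro j hj
    rcases lt_or_eq_of_le hj with hlt | heq
    · have hdrop : ns.drop j = ns[j] :: ns.drop (j + 1) := List.drop_eq_getElem_cons hlt
      have hget : PySem.List.pyGetD ns (j : Int) 0 = ns[j] := by
        rw [PySem.List.pyGetD_natCast, List.getD_eq_getElem ns 0 hlt]
      rw [List.foldl_cons]
      by_cases hcmp : ns[j] < k
      · rw [if_pos ⟨by exact_mod_cast hlt, by rw [hget]; exact hcmp⟩]
        have : ((j : Int) + 1) = ((j + 1 : Nat) : Int) := by push_cast; ring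
        rw [this, IH (j + 1) hlt, hdrop, twoRec, if_pos hcmp]
        push_cast; ring
      · rw [if_neg (by rw [hget]; tauto), IH j hj, hdrop, twoRec, if_neg hcmp, ← hdrop]
    · subst heq
      have hdrop : ns.drop ns.length = ([] : List Int) := by simp
      rw [List.foldl_cons, if_neg (by simp), IH ns.length le_rfl, hdrop]
      simp [twoRec_nil]

-- ===== VERDICT (by name: the statement is the Claim_ definition above) =====
theorem solve_war_spec : Claim_equal_solve_war := by
  intro N K _ hpre
  unfold Spec_solve_war solve_war solve_war_alt
  obtain ⟨hdisj, hlen⟩ := hpre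
  have hsn := PySem.List.sorted_perm (PySem.Set.ofList N) (fun v => v) false
  have hsk := PySem.List.sorted_perm (PySem.Set.ofList K) (fun v => v) false
  have hsnp : (PySem.List.sorted (PySem.Set.ofList N) (fun v => v)).Pairwise (· < ·) :=
    PySem.List.sorted_ofList_pairwise_lt N
  have hskp : (PySem.List.sorted (PySem.Set.ofList K) (fun v => v)).Pairwise (· < ·) :=
    PySem.List.sorted_ofList_pairwise_lt K
  have hdisj' : ∀ a ∈ PySem.Set.ofList N, a ∉ PySem.Set.ofList K := by
    intro a ha hak
    exact hdisj a ((PySem.Set.mem_ofList N a).mp ha) ((PySem.Set.mem_ofList K a).mp hak)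
  have h1 : warLoop (PySem.Set.ofList N) (PySem.Set.ofList K) 0
      = warLoop (PySem.List.sorted (PySem.Set.ofList N) (fun v => v)) (PySem.Set.ofList K) 0 :=
    warLoop_perm hsn.symm _ 0 hdisj' hlen
  have h2 := warLoop_sorted (PySem.List.sorted (PySem.Set.ofList N) (fun v => v))
    (PySem.Set.ofList K) (PySem.List.sorted (PySem.Set.ofList K) (fun v => v)) 0
    hsnp (fun a ha => hdisj' a (hsn.mem_iff.mp ha)) (hsn.length_eq ▸ hlen) hsk hskp
  have h3 := foldl_twoPtr (PySem.List.sorted (PySem.Set.ofList N) (fun v => v))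
    (PySem.List.sorted (PySem.Set.ofList K) (fun v => v)) 0 (Nat.zero_le _)
  simp only [Nat.cast_zero, List.drop_zero] at h3
  rw [h1, h2]
  simp only [h3]
  omega
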